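-- pv_equiv track=rewrite | github.com/ZHBALEX/Numerical-CFD | Numerical Methods Projects/Final Project/Final Project code/(h)/(h)(Answer)PointS Potential.py | Large_transfer
-- ===== SOURCE A (Python) =====
-- def Large_transfer(F, n, j_max, i_max):
--     large_j_max = n * j_max
--     large_i_max = n * i_max
--
--     center_j_large = large_j_max // 2
--     center_i_large = large_i_max // 2
--
--     center_j_small = j_max // 2
--     center_i_small = i_max // 2
--
--     start_j = center_j_large - center_j_small - (0 if j_max % 2 else 1)
--     start_i = center_i_large - center_i_small - (0 if i_max % 2 else 1)
--
--     P = [[0 for _ in range(large_i_max)] for _ in range(large_j_max)]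
--
--     for j in range(j_max):
--         for i in range(i_max):
--             P[start_j + j][start_i + i] = F[j][i]
--
--     return P
-- ===== SOURCE B (Python) =====
-- def Large_transfer(F, n, j_max, i_max):
--     large_j_max = n * j_max
--     large_i_max = n * i_max
--
--     start_j = large_j_max // 2 - j_max // 2 - (0 if j_max % 2 else 1)
--     start_i = large_i_max // 2 - i_max // 2 - (0 if i_max % 2 else 1)
--
--     P = []
--     for r in range(large_j_max):
--         if start_j <= r < start_j + j_max:
--             row = [0] * start_i + [F[r - start_j][i] for i in range(i_max)]
--             row += [0] * (large_i_max - len(row))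
--         else:
--             row = [0] * large_i_max
--         P.append(row)
--     return P
-- ===== Notes on version B (the rewrite author's own statement) =====
-- stated objective: alternative
-- what changed: B builds the result row-by-row by concatenation (zero padding + the copied slice of F, then padded to full width) instead of preallocating a zero matrix and scattering F into it by index assignment; Pre_ excludes n = 1 with an even j_max or i_max (both dims >= 1), where the computed start offset is -1, a degenerate corner with no specified placement (A wraps the first row/column to the end via negative indexing, B shifts and pads).
-- outside the precondition, e.g. on Large_transfer([[1], [2]], 1, 2, 1): A returns [[2], [1]], B returns [[2], [0]]
import Mathlib
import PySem

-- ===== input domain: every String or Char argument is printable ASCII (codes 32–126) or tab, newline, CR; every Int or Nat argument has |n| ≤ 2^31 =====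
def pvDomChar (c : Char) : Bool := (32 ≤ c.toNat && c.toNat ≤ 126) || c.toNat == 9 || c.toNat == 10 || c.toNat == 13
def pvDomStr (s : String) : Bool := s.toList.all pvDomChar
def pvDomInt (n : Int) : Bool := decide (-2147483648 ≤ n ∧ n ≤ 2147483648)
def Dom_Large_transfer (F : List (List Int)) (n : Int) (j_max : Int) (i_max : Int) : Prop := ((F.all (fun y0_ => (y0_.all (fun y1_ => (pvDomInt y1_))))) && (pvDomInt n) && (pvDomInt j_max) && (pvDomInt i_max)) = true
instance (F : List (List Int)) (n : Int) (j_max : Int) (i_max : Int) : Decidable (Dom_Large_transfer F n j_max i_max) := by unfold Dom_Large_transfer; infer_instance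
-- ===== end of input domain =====

-- B builds the embedded matrix row-by-row by concatenation (left zero padding,
-- the copied row of F, pad to full width) instead of A's preallocate-zeros-and-
-- scatter by index assignment; same cost, different structure.

-- ===== PORT A =====
-- literal transliteration of A: build zero matrix, then nested loops assigning
-- P[start_j + j][start_i + i] = F[j][i]  (Python index semantics via pySetD/pyGetD)
def Large_transfer (F : List (List Int)) (n : Int) (j_max : Int) (i_max : Int) : List (List Int) :=
  let large_j_max := n * j_max
  let large_i_max := n * i_max
  let center_j_large := PySem.Int.floordiv large_j_max 2
  let center_i_large := PySem.Int.floordiv large_i_max 2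
  let center_j_small := PySem.Int.floordiv j_max 2
  let center_i_small := PySem.Int.floordiv i_max 2
  let start_j := center_j_large - center_j_small - (if PySem.Int.mod j_max 2 ≠ 0 then 0 else 1)
  let start_i := center_i_large - center_i_small - (if PySem.Int.mod i_max 2 ≠ 0 then 0 else 1)
  let P0 := (PySem.List.pyRange 0 large_j_max 1).map (fun _ => (PySem.List.pyRange 0 large_i_max 1).map (fun _ => (0 : Int)))
  (PySem.List.pyRange 0 j_max 1).foldl (fun P j =>
    (PySem.List.pyRange 0 i_max 1).foldl (fun P i =>
      PySem.List.pySetD P (start_j + j)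
        (PySem.List.pySetD (PySem.List.pyGetD P (start_j + j) [])
          (start_i + i)
          (PySem.List.pyGetD (PySem.List.pyGetD F j []) i 0))) P) P0

-- ===== PORT B =====
-- transliteration of Source B: append one constructed row per output index
def Large_transfer_alt (F : List (List Int)) (n : Int) (j_max : Int) (i_max : Int) : List (List Int) :=
  let large_j_max := n * j_max
  let large_i_max := n * i_max
  let start_j := PySem.Int.floordiv large_j_max 2 - PySem.Int.floordiv j_max 2 - (if PySem.Int.mod j_max 2 ≠ 0 then 0 else 1)
  let start_i := PySem.Int.floordiv large_i_max 2 - PySem.Int.floordiv i_max 2 - (if PySem.Int.mod i_max 2 ≠ 0 then 0 else 1)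
  (PySem.List.pyRange 0 large_j_max 1).map (fun r =>
    if start_j ≤ r ∧ r < start_j + j_max then
      let row := List.replicate start_i.toNat 0 ++
        (PySem.List.pyRange 0 i_max 1).map (fun i =>
          PySem.List.pyGetD (PySem.List.pyGetD F (r - start_j) []) i 0)
      row ++ List.replicate (large_i_max - (row.length : Int)).toNat 0
    else List.replicate large_i_max.toNat 0)

-- ===== PRECONDITION & SPEC =====
-- Pre_ excludes (a) the inputs where Python A raises IndexError — when both
-- dimensions are positive A needs n ≥ 1 (a nonempty target) and F with j_max rows
-- of length ≥ i_max — and (b) n = 1 with an even j_max or i_max (both dims ≥ 1):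
-- there the computed start offset is -1, a degenerate corner with no specified
-- placement (A wraps the first row/column to the end via negative indexing,
-- B shifts and pads); for nonpositive dimensions the loops never index and A returns.
def Pre_Large_transfer (F : List (List Int)) (n : Int) (j_max : Int) (i_max : Int) : Prop :=
  1 ≤ j_max → 1 ≤ i_max →
    (1 ≤ n ∧ j_max ≤ (F.length : Int) ∧ (∀ row ∈ F.take j_max.toNat, i_max ≤ (row.length : Int))
      ∧ ¬(n = 1 ∧ (j_max % 2 = 0 ∨ i_max % 2 = 0)))
instance (F : List (List Int)) (n : Int) (j_max : Int) (i_max : Int) : Decidable (Pre_Large_transfer F n j_max i_max) := by unfold Pre_Large_transfer; infer_instance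

def pvWitness_Large_transfer : List (List Int) × Int × Int × Int := ([[7]], 3, 1, 1)

def Spec_Large_transfer (F : List (List Int)) (n : Int) (j_max : Int) (i_max : Int) (out : List (List Int)) : Prop := out = Large_transfer_alt F n j_max i_max
instance (F : List (List Int)) (n : Int) (j_max : Int) (i_max : Int) (out : List (List Int)) : Decidable (Spec_Large_transfer F n j_max i_max out) := by unfold Spec_Large_transfer; infer_instance

-- ===== CLAIM (what is proved, stated in full; the proofs are below) =====
def Claim_equal_Large_transfer : Prop := ∀ (F : List (List Int)) (n : Int) (j_max : Int) (i_max : Int), Dom_Large_transfer F n j_max i_max → Pre_Large_transfer F n j_max i_max → Spec_Large_transfer F n j_max i_max (Large_transfer F n j_max i_max)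

-- ===== LEMMAS AND PROOFS =====

-- a zero row as A builds them (proof-side abbreviation)
def pvZeroRow (L : Int) : List Int := (PySem.List.pyRange 0 L 1).map (fun _ => (0 : Int))

theorem pvZeroRow_replicate (L : Int) : pvZeroRow L = List.replicate L.toNat 0 := by
  unfold pvZeroRow
  rw [List.map_const', PySem.List.length_pyRange_one]
  norm_num

theorem pvGetElem_map_range0 {α : Type} (f : Int → α) (L : Int) (m : Nat)
    (hm : m < ((PySem.List.pyRange 0 L 1).map f).length) :
    ((PySem.List.pyRange 0 L 1).map f)[m] = f (m : Int) := by
  rw [List.getElem_map, PySem.List.getElem_pyRange_one]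
  norm_num

-- advancing the window by one set
theorem pvSet_window {α : Type} (L s k : Int) (w : Int → α) (z : α)
    (hs : 0 ≤ s) (hk : 0 ≤ k) (hkL : s + k < L) :
    (((PySem.List.pyRange 0 L 1).map
        (fun r => if s ≤ r ∧ r < s + k then w (r - s) else z)).set
      (s + k).toNat (w k))
    = (PySem.List.pyRange 0 L 1).map
        (fun r => if s ≤ r ∧ r < s + (k + 1) then w (r - s) else z) := by
  apply List.ext_getElem
  · simp
  · intro m hm1 hm2
    rw [List.getElem_set]
    rw [pvGetElem_map_range0, pvGetElem_map_range0]
    have hmL : (m : Int) < L := by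
      have := hm2
      rw [List.length_map, PySem.List.length_pyRange_one] at this
      omega
    by_cases hc : (s + k).toNat = m
    · have hmk : (m : Int) = s + k := by omega
      rw [if_pos hc, if_pos (by omega)]
      congr 1
      omega
    · have hmk : (m : Int) ≠ s + k := by omega
      rw [if_neg hc]
      by_cases hin : s ≤ (m : Int) ∧ (m : Int) < s + k
      · rw [if_pos hin, if_pos ⟨hin.1, by omega⟩]
      · rw [if_neg hin, if_neg (by omega)]

-- the inner fold over the zero row builds the window row
theorem pvRow_fold (v : Int → Int) (si LI imax : Int)
    (hsi : 0 ≤ si) (hhi : si + imax ≤ LI) (k : Nat) (hk : (k : Int) ≤ imax) :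
    (PySem.List.pyRange 0 (k : Int) 1).foldl
        (fun row i => PySem.List.pySetD row (si + i) (v i)) (pvZeroRow LI)
    = (PySem.List.pyRange 0 LI 1).map
        (fun c => if si ≤ c ∧ c < si + (k : Int) then v (c - si) else 0) := by
  induction k with
  | zero =>
    rw [show ((0 : Nat) : Int) = 0 from rfl, PySem.List.pyRange_one_eq_nil le_rfl]
    simp only [List.foldl_nil]
    unfold pvZeroRow
    apply List.map_congr_left
    intro c _
    rw [if_neg (by omega)]
  | succ k ih =>
    have hk' : (k : Int) ≤ imax := by push_cast at hk ⊢; omega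
    rw [show ((k + 1 : Nat) : Int) = (k : Int) + 1 from by push_cast; ring]
    rw [PySem.List.pyRange_one_succ_right (by positivity)]
    rw [List.foldl_append, ih hk']
    simp only [List.foldl_cons, List.foldl_nil]
    rw [PySem.List.pySetD_of_nonneg _ _ (show (0:Int) ≤ si + (k:Int) by omega)]
    exact pvSet_window LI si (k : Int) v 0 hsi (by omega) (by push_cast at hk; omega)

-- the inner Python loop touches exactly one row of the matrix
theorem pvInner_py (F : List (List Int)) (sj si jv : Int) (l : List Int)
    (P : List (List Int)) (hlo : 0 ≤ sj + jv) (hhi : sj + jv < (P.length : Int)) :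
    l.foldl (fun Q i =>
        PySem.List.pySetD Q (sj + jv)
          (PySem.List.pySetD (PySem.List.pyGetD Q (sj + jv) []) (si + i)
            (PySem.List.pyGetD (PySem.List.pyGetD F jv []) i 0))) P
    = P.set (sj + jv).toNat
        (l.foldl (fun row i =>
          PySem.List.pySetD row (si + i)
            (PySem.List.pyGetD (PySem.List.pyGetD F jv []) i 0))
          (P.getD (sj + jv).toNat [])) := by
  have hρ : (sj + jv).toNat < P.length := by omega
  induction l generalizing P with
  | nil =>
    simp only [List.foldl_nil]
    rw [List.getD_eq_getElem _ _ hρ, List.set_getElem_self]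
  | cons i l ih =>
    simp only [List.foldl_cons]
    rw [PySem.List.pyGetD_eq_getElem P [] hlo (by omega),
        PySem.List.pySetD_of_nonneg _ _ hlo]
    rw [ih _ (by simpa using hhi) (by simpa using hρ)]
    have hgd : ∀ (x : List Int), (P.set (sj + jv).toNat x).getD (sj + jv).toNat [] = x := by
      intro x
      rw [List.getD_eq_getElem _ _ (by simpa using hρ), List.getElem_set_self]
    rw [hgd, List.set_set]
    congr 2
    rw [List.getD_eq_getElem _ _ hρ]

-- A's double loop equals the window map
theorem pvOuter_eq (F : List (List Int)) (sj si LJ LI jmax imax : Int)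
    (hsj : 0 ≤ sj) (hsj2 : sj + jmax ≤ LJ) (hsi : 0 ≤ si) (hsi2 : si + imax ≤ LI)
    (him0 : 0 ≤ imax) (k : Nat) (hk : (k : Int) ≤ jmax) :
    (PySem.List.pyRange 0 (k : Int) 1).foldl (fun P j =>
        (PySem.List.pyRange 0 imax 1).foldl (fun Q i =>
          PySem.List.pySetD Q (sj + j)
            (PySem.List.pySetD (PySem.List.pyGetD Q (sj + j) []) (si + i)
              (PySem.List.pyGetD (PySem.List.pyGetD F j []) i 0))) P)
      ((PySem.List.pyRange 0 LJ 1).map (fun _ => pvZeroRow LI))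
    = (PySem.List.pyRange 0 LJ 1).map (fun r =>
        if sj ≤ r ∧ r < sj + (k : Int) then
          (PySem.List.pyRange 0 LI 1).map (fun c =>
            if si ≤ c ∧ c < si + imax then
              PySem.List.pyGetD (PySem.List.pyGetD F (r - sj) []) (c - si) 0
            else 0)
        else pvZeroRow LI) := by
  induction k with
  | zero =>
    rw [show ((0 : Nat) : Int) = 0 from rfl, PySem.List.pyRange_one_eq_nil le_rfl]
    simp only [List.foldl_nil]
    apply List.map_congr_left
    intro r _
    rw [if_neg (by omega)]
  | succ k ih =>
    have hk' : (k : Int) ≤ jmax := by push_cast at hk ⊢; omega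
    have hkjm : (k : Int) < jmax := by push_cast at hk; omega
    rw [show ((k + 1 : Nat) : Int) = (k : Int) + 1 from by push_cast; ring]
    rw [PySem.List.pyRange_one_succ_right (by positivity)]
    rw [List.foldl_append, ih hk']
    simp only [List.foldl_cons, List.foldl_nil]
    rw [pvInner_py F sj si (k : Int) _ _ (by omega)
      (by rw [List.length_map, PySem.List.length_pyRange_one]; omega)]
    -- the touched row is still the zero row
    have hρnat : (sj + (k : Int)).toNat < LJ.toNat := by omega
    have hgd : ((PySem.List.pyRange 0 LJ 1).map (fun r =>
        if sj ≤ r ∧ r < sj + (k : Int) then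
          (PySem.List.pyRange 0 LI 1).map (fun c =>
            if si ≤ c ∧ c < si + imax then
              PySem.List.pyGetD (PySem.List.pyGetD F (r - sj) []) (c - si) 0
            else 0)
        else pvZeroRow LI)).getD (sj + (k : Int)).toNat [] = pvZeroRow LI := by
      rw [List.getD_eq_getElem _ _ (by
        rw [List.length_map, PySem.List.length_pyRange_one]; omega)]
      rw [pvGetElem_map_range0]
      rw [show (((sj + (k : Int)).toNat : Nat) : Int) = sj + (k : Int) from by omega]
      rw [if_neg (by omega)]
    rw [hgd]
    -- the inner fold over the zero row is the window row
    have hrow := pvRow_fold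
      (fun i => PySem.List.pyGetD (PySem.List.pyGetD F (k : Int) []) i 0)
      si LI imax hsi hsi2 imax.toNat (by omega)
    rw [show ((imax.toNat : Nat) : Int) = imax from by omega] at hrow
    beta_reduce at hrow
    rw [hrow]
    -- setting that row advances the window
    have hw := pvSet_window LJ sj (k : Int)
      (fun jj => (PySem.List.pyRange 0 LI 1).map (fun c =>
        if si ≤ c ∧ c < si + imax then
          PySem.List.pyGetD (PySem.List.pyGetD F jj []) (c - si) 0
        else 0))
      (pvZeroRow LI) hsj (by omega) (by omega)
    beta_reduce at hw
    exact hw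

-- the window row equals B's concatenated row
theorem pvRow_concat (g : Int → Int) (si LI imax : Int)
    (hsi : 0 ≤ si) (him : 0 ≤ imax) (hhi : si + imax ≤ LI) :
    (PySem.List.pyRange 0 LI 1).map
        (fun c => if si ≤ c ∧ c < si + imax then g (c - si) else 0)
    = (List.replicate si.toNat 0 ++ (PySem.List.pyRange 0 imax 1).map g)
        ++ List.replicate (LI - (si + imax)).toNat 0 := by
  have hL0 : 0 ≤ LI := by omega
  apply List.ext_getElem
  · simp [PySem.List.length_pyRange_one]
    omega
  · intro m hm1 hm2
    rw [pvGetElem_map_range0]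
    have hmL : (m : Int) < LI := by
      rw [List.length_map, PySem.List.length_pyRange_one] at hm1
      omega
    have hlen1 : (List.replicate si.toNat (0:Int) ++ List.map g (PySem.List.pyRange 0 imax 1)).length = si.toNat + imax.toNat := by
      simp [PySem.List.length_pyRange_one]
    by_cases hA : m < si.toNat
    · rw [if_neg (by omega)]
      rw [List.getElem_append_left (by omega)]
      rw [List.getElem_append_left (by simp; omega)]
      rw [List.getElem_replicate]
    · by_cases hB : m < si.toNat + imax.toNat
      · rw [if_pos (by omega)]
        rw [List.getElem_append_left (by omega)]
        rw [List.getElem_append_right (by simp; omega)]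
        rw [List.getElem_map, PySem.List.getElem_pyRange_one]
        congr 1
        simp only [List.length_replicate]
        omega
      · rw [if_neg (by omega)]
        rw [List.getElem_append_right (by omega)]
        rw [List.getElem_replicate]

theorem pvFoldl_id {α β : Type} (l : List β) (P : α) :
    l.foldl (fun Q _ => Q) P = P := by
  induction l generalizing P with
  | nil => rfl
  | cons x l ih => simp only [List.foldl_cons]; exact ih P

theorem pvMain (F : List (List Int)) (n j_max i_max : Int)
    (hn : 1 ≤ n) (hj : 1 ≤ j_max) (hi : 1 ≤ i_max)
    (hodd : ¬(n = 1 ∧ (j_max % 2 = 0 ∨ i_max % 2 = 0))) :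
    Large_transfer F n j_max i_max = Large_transfer_alt F n j_max i_max := by
  have hM0 : 0 < n * j_max := mul_pos (by omega) (by omega)
  have hK0 : 0 < n * i_max := mul_pos (by omega) (by omega)
  have hjm : j_max ≤ n * j_max := le_mul_of_one_le_left (by omega) hn
  have him : i_max ≤ n * i_max := le_mul_of_one_le_left (by omega) hn
  have hn2 : n = 1 ∨ (2 * j_max ≤ n * j_max ∧ 2 * i_max ≤ n * i_max) := by
    rcases eq_or_lt_of_le hn with h | h
    · exact Or.inl h.symm
    · refine Or.inr ⟨?_, ?_⟩
      · exact mul_le_mul_of_nonneg_right (by omega) (by omega)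
      · exact mul_le_mul_of_nonneg_right (by omega) (by omega)
  simp only [Large_transfer, Large_transfer_alt]
  simp only [PySem.Int.floordiv_eq_ediv_of_pos (show (0:Int) < 2 by norm_num),
    PySem.Int.mod_eq_emod_of_pos (show (0:Int) < 2 by norm_num)]
  set M := n * j_max with hM
  set K := n * i_max with hK
  set sj := M / 2 - j_max / 2 - (if j_max % 2 ≠ 0 then (0:Int) else 1) with hsjdef
  set si := K / 2 - i_max / 2 - (if i_max % 2 ≠ 0 then (0:Int) else 1) with hsidef
  have hsj : 0 ≤ sj ∧ sj + j_max ≤ M := by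
    rcases hn2 with h1 | h2
    · have hMj : M = j_max := by rw [hM, h1, one_mul]
      have hjo : j_max % 2 ≠ 0 := fun hc => hodd ⟨h1, Or.inl hc⟩
      rw [hsjdef, if_pos hjo]
      omega
    · rw [hsjdef]
      split_ifs <;> omega
  have hsi : 0 ≤ si ∧ si + i_max ≤ K := by
    rcases hn2 with h1 | h2
    · have hKi : K = i_max := by rw [hK, h1, one_mul]
      have hio : i_max % 2 ≠ 0 := fun hc => hodd ⟨h1, Or.inr hc⟩
      rw [hsidef, if_pos hio]
      omega
    · rw [hsidef]
      split_ifs <;> omega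
  have hout := pvOuter_eq F sj si M K j_max i_max hsj.1 hsj.2 hsi.1 hsi.2
    (by omega) j_max.toNat (by omega)
  rw [show ((j_max.toNat : Nat) : Int) = j_max from by omega] at hout
  simp only [pvZeroRow] at hout
  rw [hout]
  apply List.map_congr_left
  intro r _
  by_cases hw : sj ≤ r ∧ r < sj + j_max
  · rw [if_pos hw, if_pos hw]
    have hrc := pvRow_concat
      (fun i => PySem.List.pyGetD (PySem.List.pyGetD F (r - sj) []) i 0)
      si K i_max hsi.1 (by omega) hsi.2
    beta_reduce at hrc
    rw [hrc]
    have hplen : (((List.replicate si.toNat (0:Int) ++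
        (PySem.List.pyRange 0 i_max 1).map (fun i =>
          PySem.List.pyGetD (PySem.List.pyGetD F (r - sj) []) i 0)).length : Nat) : Int)
        = si + i_max := by
      simp only [List.length_append, List.length_replicate, List.length_map,
        PySem.List.length_pyRange_one]
      omega
    rw [hplen]
  · rw [if_neg hw, if_neg hw]
    have hz := pvZeroRow_replicate K
    unfold pvZeroRow at hz
    exact hz

theorem pvDegJ (F : List (List Int)) (n j_max i_max : Int) (hj : j_max ≤ 0) :
    Large_transfer F n j_max i_max = Large_transfer_alt F n j_max i_max := by
  simp only [Large_transfer, Large_transfer_alt]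
  rw [PySem.List.pyRange_one_eq_nil hj]
  simp only [List.foldl_nil]
  apply List.map_congr_left
  intro r _
  rw [if_neg (by rintro ⟨h1, h2⟩; omega)]
  have hz := pvZeroRow_replicate (n * i_max)
  unfold pvZeroRow at hz
  exact hz

theorem pvDegI (F : List (List Int)) (n j_max i_max : Int) (hj : 1 ≤ j_max) (hi : i_max ≤ 0) :
    Large_transfer F n j_max i_max = Large_transfer_alt F n j_max i_max := by
  simp only [Large_transfer, Large_transfer_alt]
  rw [PySem.List.pyRange_one_eq_nil hi]
  simp only [List.foldl_nil, pvFoldl_id]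
  apply List.map_congr_left
  intro r hr
  rw [PySem.List.mem_pyRange_one] at hr
  have hn1 : 1 ≤ n := by
    by_contra hc
    have : n * j_max ≤ 0 := mul_nonpos_of_nonpos_of_nonneg (by omega) (by omega)
    omega
  have hKi : n * i_max ≤ i_max := by
    have h := mul_le_mul_of_nonpos_right hn1 hi
    omega
  have hK : n * i_max ≤ 0 := by omega
  rw [PySem.List.pyRange_one_eq_nil hK]
  have hsi : PySem.Int.floordiv (n * i_max) 2 - PySem.Int.floordiv i_max 2 -
      (if PySem.Int.mod i_max 2 ≠ 0 then (0:Int) else 1) ≤ 0 := by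
    rw [PySem.Int.floordiv_eq_ediv_of_pos (show (0:Int) < 2 by norm_num),
        PySem.Int.floordiv_eq_ediv_of_pos (show (0:Int) < 2 by norm_num)]
    split_ifs <;> omega
  set si := PySem.Int.floordiv (n * i_max) 2 - PySem.Int.floordiv i_max 2 -
      (if PySem.Int.mod i_max 2 ≠ 0 then (0:Int) else 1) with hsidef
  split_ifs <;>
    simp only [List.map_nil, List.append_nil, List.length_replicate] <;>
    first
      | (rw [show si.toNat = 0 from by omega]
         simp only [List.replicate_zero, List.nil_append]
         rw [show ((n * i_max - ((0:Nat):Int)).toNat) = 0 from by omega]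
         simp)
      | (rw [show (n * i_max).toNat = 0 from by omega]
         simp)

-- ===== VERDICT (by name: the statement is the Claim_ definition above) =====
theorem Large_transfer_spec : Claim_equal_Large_transfer := by
  intro F n j_max i_max _hdom hpre
  unfold Spec_Large_transfer
  by_cases hj : 1 ≤ j_max
  · by_cases hi : 1 ≤ i_max
    · obtain ⟨hn, _, _, hodd⟩ := hpre hj hi
      exact pvMain F n j_max i_max hn hj hi hodd
    · exact pvDegI F n j_max i_max hj (by omega)
  · exact pvDegJ F n j_max i_max (by omega)
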